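-- pv_equiv track=rewrite | github.com/Pelldom/EmojiSpace | src/world_generator.py | _evaluate_economy_gate
-- ===== SOURCE A (Python) =====
-- from typing import Dict, List, Optional, Tuple
--
-- def _evaluate_economy_gate(economy_gate: Dict[str, str], economies: List[str]) -> str:
--     if not economies:
--         return "NO"
--     any_limited = False
--     for economy_id in economies:
--         result = economy_gate.get(economy_id, "NO")
--         if result == "YES":
--             return "YES"
--         if result == "LIMITED":
--             any_limited = True
--     return "LIMITED" if any_limited else "NO"
-- ===== SOURCE B (Python) =====
-- def _evaluate_economy_gate(economy_gate, economies):
--     prio = {"NO": 0, "LIMITED": 1, "YES": 2}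
--     best = max((prio.get(economy_gate.get(e, "NO"), 0) for e in economies), default=0)
--     return {0: "NO", 1: "LIMITED", 2: "YES"}.get(best, "NO")
-- ===== Notes on version B (the rewrite author's own statement) =====
-- stated objective: idiomatic
-- what changed: Replaced the early-exit scan with a boolean flag by a reduce-to-maximum over a priority encoding (NO=0, LIMITED=1, YES=2) with a reverse lookup of the best priority.
import Mathlib
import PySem

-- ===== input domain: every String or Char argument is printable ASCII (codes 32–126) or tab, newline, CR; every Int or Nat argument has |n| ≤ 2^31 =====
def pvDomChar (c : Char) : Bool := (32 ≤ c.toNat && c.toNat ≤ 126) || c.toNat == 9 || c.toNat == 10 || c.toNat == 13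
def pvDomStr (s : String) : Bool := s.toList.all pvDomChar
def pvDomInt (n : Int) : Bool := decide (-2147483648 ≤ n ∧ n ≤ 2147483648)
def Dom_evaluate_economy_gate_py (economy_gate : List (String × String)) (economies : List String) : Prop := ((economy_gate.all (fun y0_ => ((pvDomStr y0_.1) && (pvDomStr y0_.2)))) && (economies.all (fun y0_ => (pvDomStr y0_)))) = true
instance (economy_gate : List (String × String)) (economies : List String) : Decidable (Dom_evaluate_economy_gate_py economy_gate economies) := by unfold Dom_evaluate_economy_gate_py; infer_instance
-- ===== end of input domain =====

-- B replaces A's early-exit flag loop by a max over a priority encoding with a reverse lookup (idiomatic; same cost).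

-- ===== PORT A =====
-- the for-loop of A, carrying the any_limited flag
def evalGateLoop (economy_gate : List (String × String)) : List String → Bool → String
  | [], any_limited => if any_limited then "LIMITED" else "NO"
  | e :: rest, any_limited =>
    let result := (PySem.Dict.mk economy_gate).getD e "NO"
    if result = "YES" then "YES"
    else evalGateLoop economy_gate rest (any_limited || result = "LIMITED")

def evaluate_economy_gate_py (economy_gate : List (String × String)) (economies : List String) : String :=
  if economies = [] then "NO"
  else evalGateLoop economy_gate economies false

-- ===== PORT B =====
def evaluate_economy_gate_py_alt (economy_gate : List (String × String)) (economies : List String) : String :=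
  let prio : PySem.Dict String Int := PySem.Dict.mk [("NO", 0), ("LIMITED", 1), ("YES", 2)]
  -- max(gen, default=0): max? with identity key, defaulting to 0 on the empty list
  let best := (PySem.List.max? (economies.map (fun e => prio.getD ((PySem.Dict.mk economy_gate).getD e "NO") 0)) (fun x => x)).getD 0
  (PySem.Dict.mk [((0 : Int), "NO"), (1, "LIMITED"), (2, "YES")]).getD best "NO"

-- ===== PRECONDITION & SPEC =====
def Spec_evaluate_economy_gate_py (economy_gate : List (String × String)) (economies : List String) (out : String) : Prop := out = evaluate_economy_gate_py_alt economy_gate economies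
instance (economy_gate : List (String × String)) (economies : List String) (out : String) : Decidable (Spec_evaluate_economy_gate_py economy_gate economies out) := by unfold Spec_evaluate_economy_gate_py; infer_instance

-- ===== CLAIM (what is proved, stated in full; the proofs are below) =====
def Claim_equal_evaluate_economy_gate_py : Prop := ∀ (economy_gate : List (String × String)) (economies : List String), Dom_evaluate_economy_gate_py economy_gate economies → Spec_evaluate_economy_gate_py economy_gate economies (evaluate_economy_gate_py economy_gate economies)

-- ===== LEMMAS AND PROOFS =====

-- priority of one economy id, as B computes it
def pvPrio (economy_gate : List (String × String)) (e : String) : Int :=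
  (PySem.Dict.mk [("NO", (0 : Int)), ("LIMITED", 1), ("YES", 2)]).getD
    ((PySem.Dict.mk economy_gate).getD e "NO") 0

lemma pvPrio_eq (economy_gate : List (String × String)) (e : String) :
    pvPrio economy_gate e =
      (if (PySem.Dict.mk economy_gate).getD e "NO" = "YES" then 2
       else if (PySem.Dict.mk economy_gate).getD e "NO" = "LIMITED" then 1 else 0) := by
  unfold pvPrio
  generalize (PySem.Dict.mk economy_gate).getD e "NO" = r
  by_cases h2 : r = "YES"
  · subst h2; decide
  · by_cases h1 : r = "LIMITED"
    · subst h1; decide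
    · by_cases h0 : r = "NO"
      · subst h0; decide
      · have e0 : ("NO" == r) = false := beq_eq_false_iff_ne.mpr (Ne.symm h0)
        have e1 : ("LIMITED" == r) = false := beq_eq_false_iff_ne.mpr (Ne.symm h1)
        have e2 : ("YES" == r) = false := beq_eq_false_iff_ne.mpr (Ne.symm h2)
        simp [PySem.Dict.getD, PySem.Dict.get?, List.find?, e0, e1, e2, h1, h2]

lemma pvPrio_le_two (economy_gate : List (String × String)) (e : String) :
    pvPrio economy_gate e ≤ 2 := by
  rw [pvPrio_eq]; split_ifs <;> norm_num

-- the rendering of a priority in {0,1,2}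
def pvRender (m : Int) : String :=
  (PySem.Dict.mk [((0 : Int), "NO"), (1, "LIMITED"), (2, "YES")]).getD m "NO"

-- main loop invariant: A's loop renders the running max starting from the flag
lemma loop_eq (economy_gate : List (String × String)) (economies : List String) (b : Bool) :
    evalGateLoop economy_gate economies b =
      pvRender (economies.foldl (fun acc e => max acc (pvPrio economy_gate e)) (if b then 1 else 0)) := by
  induction economies generalizing b with
  | nil => cases b <;> rfl
  | cons e t ih =>
    rw [evalGateLoop]
    set r := (PySem.Dict.mk economy_gate).getD e "NO" with hr
    by_cases h2 : r = "YES"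
    · -- early return "YES": the running max is pinned at 2
      have hp : pvPrio economy_gate e = 2 := by rw [pvPrio_eq, ← hr, if_pos h2]
      have hmax2 : ∀ (t : List String) (a : Int), a = 2 →
          t.foldl (fun acc x => max acc (pvPrio economy_gate x)) a = 2 := by
        intro t
        induction t with
        | nil => intro a ha; simpa using ha
        | cons y s ihs =>
          intro a ha
          simp only [List.foldl_cons]
          exact ihs _ (by rw [ha]; exact max_eq_left (pvPrio_le_two _ _))
      have hinit : max (if b then (1:Int) else 0) (pvPrio economy_gate e) = 2 := by
        rw [hp]; cases b <;> simp
      simp only [if_pos h2, List.foldl_cons, hinit, hmax2 t 2 rfl]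
      decide
    · rw [if_neg h2, ih]
      have hp : pvPrio economy_gate e = if r = "LIMITED" then 1 else 0 := by
        rw [pvPrio_eq, ← hr, if_neg h2]
      have hini : max (if b then (1:Int) else 0) (pvPrio economy_gate e)
          = (if (b || decide (r = "LIMITED")) then 1 else 0) := by
        rw [hp]; cases b <;> by_cases h1 : r = "LIMITED" <;> simp [h1]
      rw [List.foldl_cons, hini]

lemma max?_getD_eq_foldl (xs : List Int) (h : ∀ y ∈ xs, (0:Int) ≤ y) :
    ((PySem.List.max? xs (fun x => x)).getD 0) = xs.foldl max 0 := by
  cases xs with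
  | nil => simp [PySem.List.max?]
  | cons x t =>
    rw [PySem.List.max?_id_cons]
    simp only [Option.getD_some, List.foldl_cons]
    have hx : max (0:Int) x = x := max_eq_right (h x (by simp))
    rw [hx]

-- ===== VERDICT (by name: the statement is the Claim_ definition above) =====
theorem evaluate_economy_gate_py_spec : Claim_equal_evaluate_economy_gate_py := by
  intro economy_gate economies _
  unfold Spec_evaluate_economy_gate_py evaluate_economy_gate_py evaluate_economy_gate_py_alt
  have hmap : ∀ y ∈ economies.map (fun e => pvPrio economy_gate e), (0:Int) ≤ y := by
    intro y hy
    obtain ⟨e, -, rfl⟩ := List.mem_map.mp hy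
    rw [pvPrio_eq]; split_ifs <;> norm_num
  by_cases hnil : economies = []
  · subst hnil
    simp [PySem.List.max?, PySem.Dict.getD, PySem.Dict.get?]
  · rw [if_neg hnil, loop_eq]
    show _ = pvRender _
    rw [show (fun e => (PySem.Dict.mk [("NO", (0:Int)), ("LIMITED", 1), ("YES", 2)]).getD
          ((PySem.Dict.mk economy_gate).getD e "NO") 0) = pvPrio economy_gate from rfl,
        max?_getD_eq_foldl _ hmap, List.foldl_map]
    rfl
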